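-- pv_equiv track=rewrite | github.com/pypi-data/pypi-mirror-256 | packages/isip-client/isip_client-0.0.4-py3-none-any.whl/isip/parser.py | parse_headers_and_body
-- ===== SOURCE A (Python) =====
-- def parse_headers_and_body(
--     lines: list[str]
-- ) -> tuple[dict[str, str], str | None] | ValueError:
--     headers: dict[str, str] = {}
--     line_break_index: int | None = None
--     for index, line in enumerate(lines):
--         if line == "":
--             line_break_index = index
--             break
--         key, value = line.split(":", 1)
--         headers[key.strip()] = value.strip()
--     body: str | None = None
--     if line_break_index is not None and len(lines) > line_break_index + 1:
--         body = "\r\n".join(lines[line_break_index + 1 :])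
--     return headers, body
-- ===== SOURCE B (Python) =====
-- def parse_headers_and_body(lines):
--     headers = {}
--     body_lines = None
--     for line in lines:
--         if body_lines is not None:
--             body_lines.append(line)
--         elif line == "":
--             body_lines = []
--         else:
--             key, value = line.split(":", 1)
--             headers[key.strip()] = value.strip()
--     return headers, ("\r\n".join(body_lines) if body_lines else None)
-- ===== Notes on version B (the rewrite author's own statement) =====
-- stated objective: alternative
-- what changed: B is a single continuous pass with a mode accumulator: once the empty line is seen it collects body lines into a list and joins them at the end, eliminating A's break, the tracked break index and the lines[idx+1:] slice entirely.
import Mathlib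
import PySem

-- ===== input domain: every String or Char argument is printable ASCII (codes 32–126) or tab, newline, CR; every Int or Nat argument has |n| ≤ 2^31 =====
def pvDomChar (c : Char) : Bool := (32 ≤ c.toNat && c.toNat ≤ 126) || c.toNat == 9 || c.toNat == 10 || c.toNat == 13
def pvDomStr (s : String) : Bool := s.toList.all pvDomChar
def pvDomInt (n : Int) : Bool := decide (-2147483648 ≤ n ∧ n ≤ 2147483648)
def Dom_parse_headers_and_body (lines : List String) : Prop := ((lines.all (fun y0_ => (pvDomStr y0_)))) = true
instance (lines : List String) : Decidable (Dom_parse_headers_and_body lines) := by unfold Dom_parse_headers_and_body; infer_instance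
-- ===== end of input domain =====

-- B replaces A's break-on-empty loop + tracked index + lines[idx+1:] slice by one continuous
-- pass with a mode accumulator that collects body lines and joins them at the end (alternative).

-- ===== PORT A =====
-- one header line: key, value = line.split(":", 1); headers[key.strip()] = value.strip()
-- (the `_ => acc` arm is Python's ValueError on a colon-less line, excluded by Pre_)
def pvStepA (acc : PySem.Dict String String) (l : String) : PySem.Dict String String :=
  match PySem.Str.splitMax? l ":" 1 with
  | some [k, v] => acc.insert (PySem.Str.strip k) (PySem.Str.strip v)
  | _ => acc

-- the for-loop with `break`: returns (headers, line_break_index)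
def pvLoopA (lines : List String) (i : Nat) (acc : PySem.Dict String String) :
    PySem.Dict String String × Option Nat :=
  match lines with
  | [] => (acc, none)
  | l :: rest =>
    if l = "" then (acc, some i)
    else pvLoopA rest (i + 1) (pvStepA acc l)

def parse_headers_and_body (lines : List String) : (List (String × String)) × Option String :=
  let r := pvLoopA lines 0 PySem.Dict.empty
  let body : Option String :=
    match r.2 with
    | some i =>
        if lines.length > i + 1 then
          some (PySem.Str.join "\r\n" (PySem.List.slice lines (some ((i : Int) + 1)) none))
        else none
    | none => none
  ((r.1).items, body)

-- ===== PORT B =====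
-- one iteration of B's single pass: state = (headers, body_lines : Option (List String))
-- (the final `_ => st` arm is Python's ValueError on a colon-less header line, excluded by Pre_)
def pvStepB (st : PySem.Dict String String × Option (List String)) (line : String) :
    PySem.Dict String String × Option (List String) :=
  match st.2 with
  | some bl => (st.1, some (bl ++ [line]))
  | none =>
    if line = "" then (st.1, some [])
    else
      match PySem.Str.splitMax? line ":" 1 with
      | some [k, v] => (st.1.insert (PySem.Str.strip k) (PySem.Str.strip v), none)
      | _ => st

def parse_headers_and_body_alt (lines : List String) : (List (String × String)) × Option String :=
  let st := lines.foldl pvStepB (PySem.Dict.empty, none)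
  let body : Option String :=
    match st.2 with
    | some bl => if bl.isEmpty then none else some (PySem.Str.join "\r\n" bl)
    | none => none
  ((st.1).items, body)

-- ===== PRECONDITION & SPEC =====
-- Pre_ excludes inputs where some line before the first empty line has no ':' — there
-- both Pythons raise ValueError (`key, value = line.split(":", 1)` unpacking).
def Pre_parse_headers_and_body (lines : List String) : Prop :=
  ∀ l ∈ lines.takeWhile (fun s => s ≠ ""), PySem.Str.isIn ":" l = true
instance (lines : List String) : Decidable (Pre_parse_headers_and_body lines) := by
  unfold Pre_parse_headers_and_body; infer_instance

def pvWitness_parse_headers_and_body : List String :=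
  ["Key: val", "Other :x", "", "body1", "body2"]

def Spec_parse_headers_and_body (lines : List String) (out : (List (String × String)) × Option String) : Prop := out = parse_headers_and_body_alt lines
instance (lines : List String) (out : (List (String × String)) × Option String) : Decidable (Spec_parse_headers_and_body lines out) := by unfold Spec_parse_headers_and_body; infer_instance

-- ===== CLAIM (what is proved, stated in full; the proofs are below) =====
def Claim_equal_parse_headers_and_body : Prop := ∀ (lines : List String), Dom_parse_headers_and_body lines → Pre_parse_headers_and_body lines → Spec_parse_headers_and_body lines (parse_headers_and_body lines)

-- ===== LEMMAS AND PROOFS =====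

-- A's loop is a fold over the lines before the first "" plus the index of that "".
theorem pvLoopA_eq (lines : List String) (i : Nat) (acc : PySem.Dict String String) :
    pvLoopA lines i acc =
      ((lines.takeWhile (fun s => s != "")).foldl pvStepA acc,
       (PySem.List.index? lines "").map (fun k => i + k)) := by
  induction lines generalizing i acc with
  | nil => simp [pvLoopA]
  | cons l rest ih =>
    by_cases hl : l = ""
    · subst hl
      rw [pvLoopA, if_pos rfl, PySem.List.index?_cons_self]
      simp
    · rw [pvLoopA, if_neg hl, ih, PySem.List.index?_cons_of_ne rest hl]
      cases hr : PySem.List.index? rest "" with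
      | none => simp [hl]
      | some k =>
        simp only [List.takeWhile_cons, bne_iff_ne, ne_eq, hl, not_false_eq_true,
          if_true, List.foldl_cons, Option.map_some, Prod.mk.injEq]
        refine ⟨by simp, ?_⟩
        simp only [Option.some.injEq]
        omega

-- once body mode is entered, B's pass only appends the remaining lines
theorem pvFoldB_body (rest : List String) (h : PySem.Dict String String) (bl : List String) :
    rest.foldl pvStepB (h, some bl) = (h, some (bl ++ rest)) := by
  induction rest generalizing bl with
  | nil => simp
  | cons r rs ih =>
    show rs.foldl pvStepB (pvStepB (h, some bl) r) = _
    rw [show pvStepB (h, some bl) r = (h, some (bl ++ [r])) from rfl, ih]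
    simp

-- B's whole pass: headers = A's header fold, body lines = the suffix after the first ""
theorem pvFoldB_eq (lines : List String) (acc : PySem.Dict String String) :
    lines.foldl pvStepB (acc, none) =
      ((lines.takeWhile (fun s => s != "")).foldl pvStepA acc,
       (PySem.List.index? lines "").map (fun i => lines.drop (i + 1))) := by
  induction lines generalizing acc with
  | nil => simp
  | cons l rest ih =>
    by_cases hl : l = ""
    · subst hl
      rw [List.foldl_cons, PySem.List.index?_cons_self]
      simp [pvStepB, pvFoldB_body]
    · rw [List.foldl_cons, PySem.List.index?_cons_of_ne rest hl]
      have hstep : pvStepB (acc, none) l = (pvStepA acc l, none) := by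
        simp only [pvStepB, pvStepA, if_neg hl]
        cases hsp : PySem.Str.splitMax? l ":" 1 with
        | none => rfl
        | some xs =>
          match xs with
          | [] => rfl
          | [_] => rfl
          | [_, _] => rfl
          | _ :: _ :: _ :: _ => rfl
      rw [hstep, ih]
      cases hr : PySem.List.index? rest "" with
      | none => simp [hl]
      | some k => simp [hl]

-- ===== VERDICT (by name: the statement is the Claim_ definition above) =====
theorem parse_headers_and_body_spec : Claim_equal_parse_headers_and_body := by
  intro lines _ _
  unfold Spec_parse_headers_and_body parse_headers_and_body parse_headers_and_body_alt
  rw [pvLoopA_eq, pvFoldB_eq]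
  cases hidx : PySem.List.index? lines "" with
  | none => simp
  | some k =>
    simp only [Option.map_some, Nat.zero_add]
    have hslice : PySem.List.slice lines (some ((k : Int) + 1)) none = lines.drop (k + 1) := by
      have h := PySem.List.slice_from_natCast lines (k + 1)
      push_cast at h
      exact h
    by_cases hlen : lines.length > k + 1
    · have hne : ¬ (lines.drop (k + 1)).isEmpty := by
        simp [List.isEmpty_iff, List.drop_eq_nil_iff]; omega
      simp [hlen, hslice, hne]
    · have he : (lines.drop (k + 1)).isEmpty := by
        simp [List.isEmpty_iff, List.drop_eq_nil_iff]; omega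
      simp [hlen, he]
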